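-- pv_equiv track=rewrite | github.com/somm12/codingTest | 삼성전자SW역량테스트/드래곤커브.py | count
-- ===== SOURCE A (Python) =====
-- def count(arr):
--     total = 0
--     arr = list(set(arr))
--     for x,y in arr:
--         cnt = 0
--         for i,j in [(0,-1),(1,-1),(1,0)]:
--             if (x+i, y+j) in arr:
--                 cnt += 1
--         if cnt == 3:
--             total += 1
--     return total
-- ===== SOURCE B (Python) =====
-- def count(arr):
--     s = set(arr)
--     s1 = {(x, y + 1) for (x, y) in s}
--     s2 = {(x - 1, y + 1) for (x, y) in s}
--     s3 = {(x - 1, y) for (x, y) in s}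
--     return len(s & s1 & s2 & s3)
-- ===== Notes on version B (the rewrite author's own statement) =====
-- stated objective: alternative
-- what changed: Replaces the per-point offset loop with a cnt==3 counter by whole-set intersection of the point set with three translated copies of itself; the answer is the size of the fourfold intersection.
import Mathlib
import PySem

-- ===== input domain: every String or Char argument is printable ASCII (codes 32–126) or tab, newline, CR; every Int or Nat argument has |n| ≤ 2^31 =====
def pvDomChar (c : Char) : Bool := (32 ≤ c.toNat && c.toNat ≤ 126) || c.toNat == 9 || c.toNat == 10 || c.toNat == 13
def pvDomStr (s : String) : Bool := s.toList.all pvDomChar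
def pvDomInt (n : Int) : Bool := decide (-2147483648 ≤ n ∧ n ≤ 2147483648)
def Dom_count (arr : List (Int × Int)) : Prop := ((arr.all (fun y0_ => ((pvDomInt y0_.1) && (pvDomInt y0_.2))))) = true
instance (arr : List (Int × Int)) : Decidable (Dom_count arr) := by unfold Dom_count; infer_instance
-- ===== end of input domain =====

-- B replaces A's per-point offset loop (with its cnt==3 counter and list membership tests)
-- by intersecting the point set with three translated copies of itself (objective: alternative algorithm).

-- ===== PORT A =====
-- for x,y in list(set(arr)): count offsets (0,-1),(1,-1),(1,0) present; total += 1 if all three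
def count (arr : List (Int × Int)) : Int :=
  let arr2 : PySem.Set (Int × Int) := PySem.Set.ofList arr
  arr2.foldl (fun total p =>
    let cnt : Int :=
      ([((0 : Int), (-1 : Int)), (1, -1), (1, 0)]).foldl
        (fun cnt q => if PySem.Set.contains arr2 (p.1 + q.1, p.2 + q.2) then cnt + 1 else cnt) 0
    if cnt = 3 then total + 1 else total) 0

-- ===== PORT B =====
-- s & s1 & s2 & s3 where s1,s2,s3 are s translated by (0,1),(-1,1),(-1,0)
def count_alt (arr : List (Int × Int)) : Int :=
  let s : PySem.Set (Int × Int) := PySem.Set.ofList arr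
  let s1 : PySem.Set (Int × Int) := PySem.Set.ofList (s.map (fun p => (p.1, p.2 + 1)))
  let s2 : PySem.Set (Int × Int) := PySem.Set.ofList (s.map (fun p => (p.1 - 1, p.2 + 1)))
  let s3 : PySem.Set (Int × Int) := PySem.Set.ofList (s.map (fun p => (p.1 - 1, p.2)))
  PySem.Set.len (PySem.Set.inter (PySem.Set.inter (PySem.Set.inter s s1) s2) s3)

-- ===== PRECONDITION & SPEC =====
def Spec_count (arr : List (Int × Int)) (out : Int) : Prop := out = count_alt arr
instance (arr : List (Int × Int)) (out : Int) : Decidable (Spec_count arr out) := by unfold Spec_count; infer_instance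

-- ===== CLAIM (what is proved, stated in full; the proofs are below) =====
def Claim_equal_count : Prop := ∀ (arr : List (Int × Int)), Dom_count arr → Spec_count arr (count arr)

-- ===== LEMMAS AND PROOFS =====

-- A's outer loop counts the elements satisfying the (decidable) property
theorem pv_foldl_count {α : Type} (P : α → Prop) [DecidablePred P] (l : List α) (t : Int) :
    l.foldl (fun acc x => if P x then acc + 1 else acc) t
      = t + ((l.filter (fun x => decide (P x))).length : Int) := by
  induction l generalizing t with
  | nil => simp
  | cons h tl ih =>
    by_cases hg : P h <;> simp [List.foldl, List.filter, hg, ih]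
    ring

-- membership in a translated copy of the set (one lemma per translation used by B)
theorem pv_c1 (S : PySem.Set (Int × Int)) (p : Int × Int) :
    PySem.Set.contains (PySem.Set.ofList (S.map (fun q => (q.1, q.2 + 1)))) p
      = PySem.Set.contains S (p.1, p.2 - 1) := by
  simp only [PySem.Set.contains, List.contains_eq_mem]
  congr 1
  simp only [eq_iff_iff, PySem.Set.mem_ofList, List.mem_map, Prod.ext_iff]
  constructor
  · rintro ⟨q, hq, h1, h2⟩
    have : q = (p.1, p.2 - 1) := by cases q; simp_all; omega
    exact this ▸ hq
  · intro h
    exact ⟨(p.1, p.2 - 1), h, by simp, by simp⟩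

theorem pv_c2 (S : PySem.Set (Int × Int)) (p : Int × Int) :
    PySem.Set.contains (PySem.Set.ofList (S.map (fun q => (q.1 - 1, q.2 + 1)))) p
      = PySem.Set.contains S (p.1 + 1, p.2 - 1) := by
  simp only [PySem.Set.contains, List.contains_eq_mem]
  congr 1
  simp only [eq_iff_iff, PySem.Set.mem_ofList, List.mem_map, Prod.ext_iff]
  constructor
  · rintro ⟨q, hq, h1, h2⟩
    have : q = (p.1 + 1, p.2 - 1) := by cases q; simp_all; omega
    exact this ▸ hq
  · intro h
    exact ⟨(p.1 + 1, p.2 - 1), h, by simp, by simp⟩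

theorem pv_c3 (S : PySem.Set (Int × Int)) (p : Int × Int) :
    PySem.Set.contains (PySem.Set.ofList (S.map (fun q => (q.1 - 1, q.2)))) p
      = PySem.Set.contains S (p.1 + 1, p.2) := by
  simp only [PySem.Set.contains, List.contains_eq_mem]
  congr 1
  simp only [eq_iff_iff, PySem.Set.mem_ofList, List.mem_map, Prod.ext_iff]
  constructor
  · rintro ⟨q, hq, h1, h2⟩
    have : q = (p.1 + 1, p.2) := by cases q; simp_all; omega
    exact this ▸ hq
  · intro h
    exact ⟨(p.1 + 1, p.2), h, by simp, by simp⟩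

-- A's inner loop over the three offsets reaches 3 iff all three neighbours are present
theorem pv_inner_eq (S : PySem.Set (Int × Int)) (p : Int × Int) :
    (([((0 : Int), (-1 : Int)), (1, -1), (1, 0)]).foldl
        (fun cnt q => if PySem.Set.contains S (p.1 + q.1, p.2 + q.2) then cnt + 1 else cnt) (0 : Int) = 3)
      ↔ (PySem.Set.contains S (p.1, p.2 - 1)
          ∧ PySem.Set.contains S (p.1 + 1, p.2 - 1)
          ∧ PySem.Set.contains S (p.1 + 1, p.2)) := by
  have h1 : p.1 + 0 = p.1 := by ring
  have h2 : p.2 + -1 = p.2 - 1 := by ring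
  simp only [List.foldl, h1, h2]
  split_ifs <;> simp_all

theorem count_eq_alt (arr : List (Int × Int)) : count arr = count_alt arr := by
  unfold count count_alt
  simp only []
  rw [pv_foldl_count]
  simp only [PySem.Set.len, PySem.Set.inter, List.filter_filter, zero_add]
  congr 2
  apply List.filter_congr
  intro p _
  rw [pv_c1, pv_c2, pv_c3, Bool.eq_iff_iff]
  simp only [Bool.and_eq_true, decide_eq_true_eq]
  rw [pv_inner_eq]
  tauto

-- ===== VERDICT (by name: the statement is the Claim_ definition above) =====
theorem count_spec : Claim_equal_count := by
  intro arr _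
  unfold Spec_count
  exact count_eq_alt arr
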